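-- pv_equiv track=rewrite | github.com/simon-dreyer/Shortest_path_sampling | code_python/Complexite_operations.py | c_Distance_et_pcc_depuis_source
-- ===== SOURCE A (Python) =====
-- def c_Distance_et_pcc_depuis_source(dist,table):
--     """Renvoie un dictionnaire où dict[l] = liste des (sommet à distance l,nombre de pcc (source)-->(arrivee) ) """
--     compteur = 0
--     dico = {}
--
--     for noeud,distance in dist.items():
--         dico.setdefault(distance, []).append((noeud,table[noeud]))
--         compteur += 1
--
--     # On veut avoir des sommes partielles en 2ème coordonnée.
--     for l in dico.keys():
--         for i in range(1,len(dico[l])):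
--             arrivee,nombre_pcc_source_arrivee = dico[l][i]
--             dico[l][i] = (arrivee, nombre_pcc_source_arrivee + dico[l][i-1][1])
--             compteur += 1
--
--     return (dico,compteur)
-- ===== SOURCE B (Python) =====
-- def c_Distance_et_pcc_depuis_source(dist, table):
--     """Renvoie un dictionnaire où dict[l] = liste des (sommet à distance l,
--     somme partielle des nombres de pcc), calcule en une seule passe."""
--     compteur = 0
--     dico = {}
--     for noeud, distance in dist.items():
--         bucket = dico.setdefault(distance, [])
--         if bucket:
--             bucket.append((noeud, table[noeud] + bucket[-1][1]))
--             compteur += 2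
--         else:
--             bucket.append((noeud, table[noeud]))
--             compteur += 1
--     return (dico, compteur)
-- ===== Notes on version B (the rewrite author's own statement) =====
-- stated objective: alternative
-- what changed: The two-phase algorithm (bucket all nodes, then a second nested loop turning each bucket into prefix sums in place) is fused into a single pass that appends each entry already prefix-summed using the bucket's current last element, with the counter incremented to account for both the insert and the prefix addition.
import Mathlib
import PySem

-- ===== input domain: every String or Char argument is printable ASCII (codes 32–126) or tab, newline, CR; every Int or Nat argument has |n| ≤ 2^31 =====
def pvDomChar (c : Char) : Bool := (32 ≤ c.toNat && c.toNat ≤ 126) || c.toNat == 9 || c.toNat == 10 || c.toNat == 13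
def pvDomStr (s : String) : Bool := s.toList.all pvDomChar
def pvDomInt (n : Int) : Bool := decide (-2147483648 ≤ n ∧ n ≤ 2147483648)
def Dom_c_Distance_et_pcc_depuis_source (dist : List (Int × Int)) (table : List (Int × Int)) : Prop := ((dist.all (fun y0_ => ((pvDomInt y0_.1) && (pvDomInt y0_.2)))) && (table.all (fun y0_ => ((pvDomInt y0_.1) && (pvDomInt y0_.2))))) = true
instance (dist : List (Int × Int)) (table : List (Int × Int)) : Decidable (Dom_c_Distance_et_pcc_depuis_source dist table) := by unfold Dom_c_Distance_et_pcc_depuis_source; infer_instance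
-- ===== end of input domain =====

-- B fuses A's two phases (bucket everything, then prefix-sum each bucket in a second
-- nested loop) into a single pass that appends entries already prefix-summed; same
-- result and counter, proved equivalent wherever A does not raise KeyError.


-- ===== PORT A =====
-- inner loop of A's second phase: 'for i in range(1, len(lst)): lst[i] = (lst[i][0], lst[i][1] + lst[i-1][1])'
-- together with its 'compteur += 1' contributions (second component)
def pvInnerLoop (lst : List (Int × Int)) : List (Int × Int) × Int :=
  (PySem.List.pyRange 1 (lst.length : Int) 1).foldl
    (fun (st : List (Int × Int) × Int) i =>
      let p := PySem.List.pyGetD st.1 i (0, 0)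
      let prev := PySem.List.pyGetD st.1 (i - 1) (0, 0)
      (PySem.List.pySetD st.1 i (p.1, p.2 + prev.2), st.2 + 1))
    (lst, 0)

-- one step of A's first loop: 'dico.setdefault(distance, []).append((noeud, table[noeud])); compteur += 1'
-- (setdefault-then-append on the bucket = modify with default []); 'table[noeud]' raises KeyError when
-- noeud is missing — Pre_ excludes that, so the getD default 0 is never used
def pvStepA (tbl : PySem.Dict Int Int) (st : PySem.Dict Int (List (Int × Int)) × Int)
    (p : Int × Int) : PySem.Dict Int (List (Int × Int)) × Int :=
  (PySem.Dict.modify st.1 p.2 [] (fun b => b ++ [(p.1, tbl.getD p.1 0)]), st.2 + 1)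

-- one step of A's second loop over dico.keys(): the in-place mutation of dico[l] is rendered as
-- rebuilding the entry list in key order, accumulating the inner loop's counter contributions
def pvStep2 (st : List (Int × List (Int × Int)) × Int) (kv : Int × List (Int × Int)) :
    List (Int × List (Int × Int)) × Int :=
  let q := pvInnerLoop kv.2
  (st.1 ++ [(kv.1, q.1)], st.2 + q.2)

def c_Distance_et_pcc_depuis_source (dist : List (Int × Int)) (table : List (Int × Int)) : (List (Int × List (Int × Int))) × Int :=
  let s := dist.foldl (pvStepA (PySem.Dict.mk table)) (PySem.Dict.empty, 0)
  s.1.items.foldl pvStep2 ([], s.2)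

-- one step of B's single loop: fetch the bucket, append the entry already prefix-summed
-- (adding the bucket's last second coordinate when the bucket is non-empty), count 1 or 2
def pvStepB (tbl : PySem.Dict Int Int) (st : PySem.Dict Int (List (Int × Int)) × Int)
    (p : Int × Int) : PySem.Dict Int (List (Int × Int)) × Int :=
  let b := st.1.getD p.2 []
  if b.isEmpty then
    (st.1.insert p.2 (b ++ [(p.1, tbl.getD p.1 0)]), st.2 + 1)
  else
    (st.1.insert p.2 (b ++ [(p.1, tbl.getD p.1 0 + (PySem.List.pyGetD b (-1) (0, 0)).2)]), st.2 + 2)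

-- ===== PORT B =====
def c_Distance_et_pcc_depuis_source_alt (dist : List (Int × Int)) (table : List (Int × Int)) : (List (Int × List (Int × Int))) × Int :=
  let s := dist.foldl (pvStepB (PySem.Dict.mk table)) (PySem.Dict.empty, 0)
  (s.1.items, s.2)

-- ===== PRECONDITION & SPEC =====
-- Pre_ excludes exactly the inputs on which A raises KeyError: some node of dist missing from table.
def Pre_c_Distance_et_pcc_depuis_source (dist : List (Int × Int)) (table : List (Int × Int)) : Prop :=
  ∀ p ∈ dist, (PySem.Dict.mk table).contains p.1 = true
instance (dist : List (Int × Int)) (table : List (Int × Int)) : Decidable (Pre_c_Distance_et_pcc_depuis_source dist table) := by unfold Pre_c_Distance_et_pcc_depuis_source; infer_instance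

def pvWitness_c_Distance_et_pcc_depuis_source : (List (Int × Int)) × (List (Int × Int)) :=
  ([(1, 0), (2, 1), (3, 1)], [(1, 1), (2, 2), (3, 3)])

def Spec_c_Distance_et_pcc_depuis_source (dist : List (Int × Int)) (table : List (Int × Int)) (out : (List (Int × List (Int × Int))) × Int) : Prop := out = c_Distance_et_pcc_depuis_source_alt dist table
instance (dist : List (Int × Int)) (table : List (Int × Int)) (out : (List (Int × List (Int × Int))) × Int) : Decidable (Spec_c_Distance_et_pcc_depuis_source dist table out) := by unfold Spec_c_Distance_et_pcc_depuis_source; infer_instance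

-- ===== CLAIM (what is proved, stated in full; the proofs are below) =====
def Claim_equal_c_Distance_et_pcc_depuis_source : Prop := ∀ (dist : List (Int × Int)) (table : List (Int × Int)), Dom_c_Distance_et_pcc_depuis_source dist table → Pre_c_Distance_et_pcc_depuis_source dist table → Spec_c_Distance_et_pcc_depuis_source dist table (c_Distance_et_pcc_depuis_source dist table)

-- ===== LEMMAS AND PROOFS =====
def pvCumsum (acc : Int) : List (Int × Int) → List (Int × Int)
  | [] => []
  | (a, b) :: t => (a, acc + b) :: pvCumsum (acc + b) t

def pvSumSnd (xs : List (Int × Int)) : Int := (xs.map Prod.snd).sum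

def pvF (kv : Int × List (Int × Int)) : Int × List (Int × Int) := (kv.1, pvCumsum 0 kv.2)

def pvW (l : List (Int × List (Int × Int))) : Int :=
  (l.map (fun kv => (kv.2.length : Int) - 1)).sum


theorem pvCumsum_length (acc : Int) (xs : List (Int × Int)) : (pvCumsum acc xs).length = xs.length := by
  induction xs generalizing acc with
  | nil => rfl
  | cons h t ih => obtain ⟨a, b⟩ := h; simp [pvCumsum, ih]
theorem pvCumsum_snoc (acc : Int) (xs : List (Int × Int)) (p : Int × Int) :
    pvCumsum acc (xs ++ [p]) = pvCumsum acc xs ++ [(p.1, acc + pvSumSnd xs + p.2)] := by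
  induction xs generalizing acc with
  | nil => simp [pvCumsum, pvSumSnd]
  | cons h t ih =>
    obtain ⟨a, b⟩ := h
    simp only [List.cons_append, pvCumsum, ih, pvSumSnd, List.map_cons, List.sum_cons]
    have : acc + b + (List.map Prod.snd t).sum = acc + (b + (List.map Prod.snd t).sum) := by ring
    rw [this]
theorem pvCumsum_getLast?_snd (acc : Int) (xs : List (Int × Int)) (h : xs ≠ []) :
    ((pvCumsum acc xs).getLast?).map Prod.snd = some (acc + pvSumSnd xs) := by
  rcases List.eq_nil_or_concat xs with rfl | ⟨l', b, rfl⟩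
  · exact absurd rfl h
  · rw [List.concat_eq_append, pvCumsum_snoc]
    simp [pvSumSnd, add_assoc]

theorem pvInner_inv (lst : List (Int × Int)) (k : Nat) (h1 : 1 ≤ k) (hk : k ≤ lst.length) :
    (PySem.List.pyRange 1 (k : Int) 1).foldl
      (fun (st : List (Int × Int) × Int) i =>
        let p := PySem.List.pyGetD st.1 i (0, 0)
        let prev := PySem.List.pyGetD st.1 (i - 1) (0, 0)
        (PySem.List.pySetD st.1 i (p.1, p.2 + prev.2), st.2 + 1))
      (lst, 0)
    = (pvCumsum 0 (lst.take k) ++ lst.drop k, (k : Int) - 1) := by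
  induction k with
  | zero => omega
  | succ k ih =>
    rcases Nat.eq_or_lt_of_le h1 with h1' | hk1
    · -- k + 1 = 1
      have hk0 : k = 0 := by omega
      subst hk0
      rw [PySem.List.pyRange_one_eq_nil (by norm_num)]
      obtain ⟨x, t, rfl⟩ : ∃ x t, lst = x :: t := by
        cases lst with
        | nil => simp at hk
        | cons x t => exact ⟨x, t, rfl⟩
      obtain ⟨a, b⟩ := x
      simp [pvCumsum]
    · have hk' : 1 ≤ k := by omega
      have hkl : k < lst.length := by omega
      have hcast : ((k + 1 : Nat) : Int) = (k : Int) + 1 := by push_cast; ring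
      rw [hcast, PySem.List.pyRange_one_succ_right (by exact_mod_cast hk' : (1:Int) ≤ (k:Int)), List.foldl_append, ih hk' (le_of_lt hkl)]
      simp only []
      set C := pvCumsum 0 (lst.take k) with hC
      have hCl : C.length = k := by
        rw [hC, pvCumsum_length, List.length_take]; omega
      have hlen : (C ++ lst.drop k).length = lst.length := by
        simp [hCl]; omega
      have hget : PySem.List.pyGetD (C ++ lst.drop k) (k : Int) (0, 0) = lst[k] := by
        rw [PySem.List.pyGetD_eq_getElem _ _ (by positivity) (by rw [hlen]; exact_mod_cast hkl)]
        simp only [Int.toNat_natCast]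
        rw [List.getElem_append_right (by omega)]
        simp [hCl]
      have hprev : PySem.List.pyGetD (C ++ lst.drop k) ((k : Int) - 1) (0, 0) = C[k-1]'(by omega) := by
        have : ((k : Int) - 1) = ((k - 1 : Nat) : Int) := by push_cast [Nat.cast_sub hk']; ring
        rw [this, PySem.List.pyGetD_eq_getElem _ _ (by positivity) (by rw [hlen]; exact_mod_cast (by omega : k - 1 < lst.length))]
        simp only [Int.toNat_natCast]
        rw [List.getElem_append_left (by omega)]
      have hlastsnd : (C[k-1]'(by omega)).2 = pvSumSnd (lst.take k) := by
        have hne : lst.take k ≠ [] := by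
          intro hnil
          rcases List.take_eq_nil_iff.mp hnil with h0 | h0
          · omega
          · rw [h0] at hkl; simp at hkl
        have h2 := pvCumsum_getLast?_snd 0 (lst.take k) hne
        rw [← hC] at h2
        have hCne : C ≠ [] := by intro hnil; rw [hnil] at hCl; simp at hCl; omega
        rw [List.getLast?_eq_some_getLast hCne] at h2
        have : C.getLast hCne = C[k-1]'(by omega) := by
          rw [List.getLast_eq_getElem]; congr 1; omega
        rw [this] at h2
        simpa using h2
      simp only [List.foldl_cons, List.foldl_nil]
      rw [hget, hprev, hlastsnd]
      have hset : PySem.List.pySetD (C ++ lst.drop k) (k : Int) (lst[k].1, lst[k].2 + pvSumSnd (lst.take k))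
          = pvCumsum 0 (lst.take (k+1)) ++ lst.drop (k+1) := by
        rw [PySem.List.pySetD_of_nonneg _ _ (by positivity)]
        have htoNat : ((k : Int)).toNat = k := by omega
        rw [htoNat]
        rw [List.take_add_one]
        have : lst[k]?.toList = [lst[k]] := by simp [List.getElem?_eq_getElem hkl]
        rw [this, pvCumsum_snoc, ← hC]
        rw [List.drop_eq_getElem_cons hkl]
        rw [List.set_append, if_neg (by omega), hCl, Nat.sub_self, List.set_cons_zero]
        simp only [List.append_assoc, List.singleton_append]
        congr 3
        ring
      rw [hset, show (k:Int) - 1 + 1 = (k:Int) + 1 - 1 by ring]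
theorem pvInnerLoop_eq (lst : List (Int × Int)) (h : lst ≠ []) :
    pvInnerLoop lst = (pvCumsum 0 lst, (lst.length : Int) - 1) := by
  have h1 : 1 ≤ lst.length := List.length_pos_iff.mpr h
  have := pvInner_inv lst lst.length h1 le_rfl
  unfold pvInnerLoop
  rw [this]
  simp

theorem pvGet?_map (d d' : PySem.Dict Int (List (Int × Int)))
    (h : d'.items = d.items.map pvF) (k : Int) :
    d'.get? k = (d.get? k).map (pvCumsum 0) := by
  simp only [PySem.Dict.get?, h, List.find?_map]
  have : ((fun p : Int × List (Int × Int) => p.1 == k) ∘ pvF) = (fun p => p.1 == k) := by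
    funext q; rfl
  rw [this]
  cases List.find? (fun p => p.1 == k) d.items with
  | none => rfl
  | some q => rfl

theorem pvGet?_none (l : List (Int × List (Int × Int))) (k : Int)
    (h : (PySem.Dict.mk l).get? k = none) : ∀ q ∈ l, q.1 ≠ k := by
  intro q hq
  simp only [PySem.Dict.get?, Option.map_eq_none_iff, List.find?_eq_none] at h
  simpa using h q hq

theorem pvInsert_of_not_mem (l : List (Int × List (Int × Int))) (k : Int) (v : List (Int × Int))
    (h : ∀ q ∈ l, q.1 ≠ k) : (PySem.Dict.mk l).insert k v = PySem.Dict.mk (l ++ [(k, v)]) := by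
  have hc : (PySem.Dict.mk l).contains k = false := by
    simp only [PySem.Dict.contains, List.any_eq_false]
    intro q hq; simpa using h q hq
  simp [PySem.Dict.insert, hc]

theorem pvInsert_decomp (l1 l2 : List (Int × List (Int × Int))) (k : Int)
    (a v : List (Int × Int)) (h1 : ∀ q ∈ l1, q.1 ≠ k) (h2 : ∀ q ∈ l2, q.1 ≠ k) :
    (PySem.Dict.mk (l1 ++ (k, a) :: l2)).insert k v = PySem.Dict.mk (l1 ++ (k, v) :: l2) := by
  have hc : (PySem.Dict.mk (l1 ++ (k, a) :: l2)).contains k = true := by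
    simp only [PySem.Dict.contains, List.any_eq_true]
    exact ⟨(k, a), by simp, by simp⟩
  simp only [PySem.Dict.insert, hc, if_pos]
  congr 1
  simp only [List.map_append, List.map_cons]
  have hid : ∀ (m : List (Int × List (Int × Int))), (∀ q ∈ m, q.1 ≠ k) →
      m.map (fun p => if (p.1 == k) = true then (k, v) else p) = m := by
    intro m hm
    conv_rhs => rw [← List.map_id m]
    exact List.map_congr_left (fun q hq => by simp [hm q hq])
  congr 1
  · exact hid l1 h1
  · congr 1
    · simp
    · exact hid l2 h2

theorem pvGet?_decomp (l : List (Int × List (Int × Int))) (k : Int) (a : List (Int × Int))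
    (hn : (l.map Prod.fst).Nodup) (hg : (PySem.Dict.mk l).get? k = some a) :
    ∃ l1 l2, l = l1 ++ (k, a) :: l2 ∧ (∀ q ∈ l1, q.1 ≠ k) ∧ (∀ q ∈ l2, q.1 ≠ k) := by
  induction l with
  | nil => simp [PySem.Dict.get?] at hg
  | cons q t ih =>
    by_cases hqk : q.1 = k
    · have hb : (q.1 == k) = true := by simpa using hqk
      have hq : q = (k, a) := by
        simp only [PySem.Dict.get?, List.find?_cons, hb, Option.map_some,
          Option.some.injEq] at hg
        obtain ⟨x, y⟩ := q
        simp only at hg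
        simp_all
      refine ⟨[], t, by simp [hq], by simp, ?_⟩
      intro r hr hrk
      simp only [List.map_cons, List.nodup_cons] at hn
      exact hn.1 (by rw [hqk, ← hrk]; exact List.mem_map_of_mem hr)
    · have hb : (q.1 == k) = false := by simpa using hqk
      have hg' : (PySem.Dict.mk t).get? k = some a := by
        simp only [PySem.Dict.get?, List.find?_cons, hb] at hg ⊢
        exact hg
      obtain ⟨l1, l2, rfl, h1, h2⟩ := ih
        (by simp only [List.map_cons, List.nodup_cons] at hn; exact hn.2) hg'
      exact ⟨q :: l1, l2, rfl,
        by intro r hr; rcases List.mem_cons.mp hr with rfl | hr; exact hqk; exact h1 r hr, h2⟩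

theorem pvInsert_decomp' (d : PySem.Dict Int (List (Int × Int)))
    (l1 l2 : List (Int × List (Int × Int))) (k : Int) (a v : List (Int × Int))
    (hd : d.items = l1 ++ (k, a) :: l2) (h1 : ∀ q ∈ l1, q.1 ≠ k) (h2 : ∀ q ∈ l2, q.1 ≠ k) :
    d.insert k v = PySem.Dict.mk (l1 ++ (k, v) :: l2) := by
  have : d = PySem.Dict.mk (l1 ++ (k, a) :: l2) := by
    cases d; simpa using hd
  rw [this]
  exact pvInsert_decomp l1 l2 k a v h1 h2

theorem pvW_append (l m : List (Int × List (Int × Int))) : pvW (l ++ m) = pvW l + pvW m := by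
  simp [pvW]

def pvInv (sA sB : PySem.Dict Int (List (Int × Int)) × Int) : Prop :=
  sB.1.items = sA.1.items.map pvF ∧
  sB.2 = sA.2 + pvW sA.1.items ∧
  (∀ kv ∈ sA.1.items, kv.2 ≠ []) ∧
  (sA.1.items.map Prod.fst).Nodup

theorem pvStep (tbl : PySem.Dict Int Int) (p : Int × Int)
    (sA sB : PySem.Dict Int (List (Int × Int)) × Int) (h : pvInv sA sB) :
    pvInv (pvStepA tbl sA p) (pvStepB tbl sB p) := by
  obtain ⟨h1, h2, h3, h4⟩ := h
  have hget := pvGet?_map sA.1 sB.1 h1 p.2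
  cases hA : sA.1.get? p.2 with
  | none =>
    have hno : ∀ q ∈ sA.1.items, q.1 ≠ p.2 := pvGet?_none sA.1.items p.2 hA
    have hnoB : ∀ q ∈ sB.1.items, q.1 ≠ p.2 := by
      rw [h1]
      intro q hq
      obtain ⟨r, hr, rfl⟩ := List.mem_map.mp hq
      exact hno r hr
    have hbB : sB.1.getD p.2 [] = [] := by rw [PySem.Dict.getD, hget, hA]; rfl
    have hbA : sA.1.getD p.2 [] = [] := by rw [PySem.Dict.getD, hA]; rfl
    simp only [pvStepB, pvStepA, pvInv, PySem.Dict.modify]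
    rw [hbB, hbA]
    simp only [List.isEmpty_nil, if_true, List.nil_append]
    rw [pvInsert_of_not_mem sA.1.items _ _ hno, pvInsert_of_not_mem sB.1.items _ _ hnoB, h1]
    have hfst : p.2 ∉ sA.1.items.map Prod.fst := by
      intro hm
      obtain ⟨r, hr, hrf⟩ := List.mem_map.mp hm
      exact hno r hr hrf
    refine ⟨?_, ?_, ?_, ?_⟩
    · simp [pvF, pvCumsum]
    · rw [h2, pvW_append]
      simp only [pvW, List.map_cons, List.map_nil, List.sum_cons, List.sum_nil,
        List.length_cons, List.length_nil]
      push_cast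
      ring
    · intro kv hkv
      rcases List.mem_append.mp hkv with hm | hm
      · exact h3 kv hm
      · simp at hm; subst hm; simp
    · simp only [List.map_append, List.map_cons, List.map_nil]
      exact List.Nodup.append h4 (List.nodup_singleton _) (by
        intro x hx hy; simp at hy; subst hy; exact hfst hx)
  | some a =>
    obtain ⟨l1, l2, hd, hl1, hl2⟩ := pvGet?_decomp sA.1.items p.2 a h4 hA
    have haNe : a ≠ [] := h3 (p.2, a) (by rw [hd]; simp)
    have hbNe : pvCumsum 0 a ≠ [] := by
      intro hx
      have := congrArg List.length hx
      rw [pvCumsum_length] at this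
      simp only [List.length_nil] at this
      exact haNe (List.length_eq_zero_iff.mp this)
    have hbB : sB.1.getD p.2 [] = pvCumsum 0 a := by rw [PySem.Dict.getD, hget, hA]; rfl
    have hlast : (PySem.List.pyGetD (pvCumsum 0 a) (-1) (0, 0)).2 = pvSumSnd a := by
      rw [PySem.List.pyGetD_neg_one _ _ hbNe]
      have h5 := pvCumsum_getLast?_snd 0 a haNe
      rw [List.getLast?_eq_some_getLast (h := hbNe)] at h5
      simp only [Option.map_some, Option.some.injEq, zero_add] at h5
      exact h5
    have hE : (pvCumsum 0 a).isEmpty = false := by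
      rw [List.isEmpty_eq_false_iff]
      exact hbNe
    have hbA : sA.1.getD p.2 [] = a := by rw [PySem.Dict.getD, hA]; rfl
    simp only [pvStepB, pvStepA, pvInv, PySem.Dict.modify]
    rw [hbB, hbA, hE]
    simp only [Bool.false_eq_true, if_false]
    rw [pvInsert_decomp' sA.1 l1 l2 p.2 a _ hd hl1 hl2]
    have hdB : sB.1.items = l1.map pvF ++ (p.2, pvCumsum 0 a) :: l2.map pvF := by
      rw [h1, hd]; simp [pvF]
    rw [pvInsert_decomp' sB.1 (l1.map pvF) (l2.map pvF) p.2 (pvCumsum 0 a) _ hdB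
      (by intro q hq; obtain ⟨r, hr, rfl⟩ := List.mem_map.mp hq; exact hl1 r hr)
      (by intro q hq; obtain ⟨r, hr, rfl⟩ := List.mem_map.mp hq; exact hl2 r hr)]
    rw [hlast]
    refine ⟨?_, ?_, ?_, ?_⟩
    · simp only [List.map_append, List.map_cons, pvF, pvCumsum_snoc, zero_add]
      have : pvSumSnd a + (tbl.getD p.1 0) = tbl.getD p.1 0 + pvSumSnd a := by ring
      rw [this]
    · rw [h2, hd, pvW_append, pvW_append]
      simp only [pvW, List.map_cons, List.sum_cons, List.length_append, List.length_cons,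
        List.length_nil]
      push_cast
      ring
    · intro kv hkv
      rcases List.mem_append.mp hkv with hm | hm
      · exact h3 kv (by rw [hd]; exact List.mem_append_left _ hm)
      · rcases List.mem_cons.mp hm with rfl | hm
        · simp
        · exact h3 kv (by rw [hd]; exact List.mem_append_right _ (List.mem_cons_of_mem _ hm))
    · have : (l1 ++ (p.2, a ++ [(p.1, tbl.getD p.1 0)]) :: l2).map Prod.fst
          = sA.1.items.map Prod.fst := by
        rw [hd]; simp
      rw [this]; exact h4

theorem pvFold (tbl : PySem.Dict Int Int) (dist : List (Int × Int))
    (sA sB : PySem.Dict Int (List (Int × Int)) × Int) (h : pvInv sA sB) :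
    pvInv (dist.foldl (pvStepA tbl) sA) (dist.foldl (pvStepB tbl) sB) := by
  induction dist generalizing sA sB with
  | nil => exact h
  | cons p t ih => exact ih _ _ (pvStep tbl p sA sB h)

theorem pvPhase2 (l : List (Int × List (Int × Int))) (acc : List (Int × List (Int × Int)))
    (c : Int) (hne : ∀ kv ∈ l, kv.2 ≠ []) :
    l.foldl pvStep2 (acc, c) = (acc ++ l.map pvF, c + pvW l) := by
  induction l generalizing acc c with
  | nil => simp [pvW]
  | cons kv t ih =>
    have hkv := pvInnerLoop_eq kv.2 (hne kv (List.mem_cons_self))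
    rw [List.foldl_cons]
    show List.foldl pvStep2 (acc ++ [(kv.1, (pvInnerLoop kv.2).1)], c + (pvInnerLoop kv.2).2) t = _
    rw [hkv, ih _ _ (fun r hr => hne r (List.mem_cons_of_mem _ hr))]
    simp only [pvW, pvF, List.map_cons, List.sum_cons, List.append_assoc, List.singleton_append,
      Prod.mk.injEq]
    exact ⟨trivial, by ring⟩


-- ===== VERDICT (by name: the statement is the Claim_ definition above) =====
theorem c_Distance_et_pcc_depuis_source_spec : Claim_equal_c_Distance_et_pcc_depuis_source := by
  intro dist table _ _
  unfold Spec_c_Distance_et_pcc_depuis_source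
  obtain ⟨h1, h2, h3, h4⟩ := pvFold (PySem.Dict.mk table) dist (PySem.Dict.empty, 0)
    (PySem.Dict.empty, 0) ⟨rfl, by simp [pvW, PySem.Dict.empty], by simp [PySem.Dict.empty], by simp [PySem.Dict.empty]⟩
  unfold c_Distance_et_pcc_depuis_source c_Distance_et_pcc_depuis_source_alt
  rw [pvPhase2 _ _ _ h3]
  simp [h1, h2]
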